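-- pv_equiv track=rewrite | github.com/nathanbrandonWD/job-history-agent | agent.py | _messages_summary
-- ===== SOURCE A (Python) =====
-- def _truncate(s: str, max_len: int = 300) -> str:
--     s = str(s)
--     return s if len(s) <= max_len else s[:max_len] + "..."
--
-- def _messages_summary(messages: list, n: int = 5) -> list:
--     """Last n non-system messages as a compact summary for the trace panel."""
--     non_system = [m for m in messages if m.get("role") != "system"]
--     result = []
--     for m in non_system[-n:]:
--         role = m.get("role", "?")
--         content = m.get("content", "") or ""
--         result.append({"role": role, "content": _truncate(str(content))})
--     return result
-- ===== SOURCE B (Python) =====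
-- def _truncate(s: str, max_len: int = 300) -> str:
--     s = str(s)
--     if len(s) > max_len:
--         return s[:max_len] + "..."
--     return s
--
-- def _messages_summary(messages: list, n: int = 5) -> list:
--     """Last n non-system messages, found by a backward scan that stops early."""
--     buf = []
--     for m in reversed(messages):
--         if len(buf) >= n:
--             break
--         if m.get("role") != "system":
--             buf.append(m)
--     buf.reverse()
--     return [
--         {"role": m.get("role", "?"), "content": _truncate(str(m.get("content", "") or ""))}
--         for m in buf
--     ]
-- ===== Notes on version B (the rewrite author's own statement) =====
-- stated objective: alternative
-- what changed: Instead of filtering the whole list, slicing off the tail and mapping, B scans backwards collecting non-system messages until it has n, stopping early, then reverses and formats the buffer; Pre_ excludes n <= 0, where 'last n messages' is unspecified and A's value falls out of Python's negative/zero slice arithmetic while B returns the empty list.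
-- outside the precondition, e.g. on _messages_summary([{'role': 'user'}], 0): A returns [{'role': 'user', 'content': ''}], B returns []
import Mathlib
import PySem

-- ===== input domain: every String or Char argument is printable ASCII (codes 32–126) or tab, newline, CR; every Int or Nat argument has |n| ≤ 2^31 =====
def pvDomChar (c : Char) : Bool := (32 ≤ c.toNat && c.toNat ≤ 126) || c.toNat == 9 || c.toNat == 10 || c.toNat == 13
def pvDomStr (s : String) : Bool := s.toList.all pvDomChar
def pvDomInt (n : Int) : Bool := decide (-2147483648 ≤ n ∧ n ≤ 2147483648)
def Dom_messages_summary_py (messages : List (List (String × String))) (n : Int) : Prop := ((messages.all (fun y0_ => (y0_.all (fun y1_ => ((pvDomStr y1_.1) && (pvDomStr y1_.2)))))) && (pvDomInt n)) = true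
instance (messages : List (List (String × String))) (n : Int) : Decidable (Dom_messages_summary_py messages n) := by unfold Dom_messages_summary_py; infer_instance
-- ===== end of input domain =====

-- B replaces A's filter-then-slice-then-map with a backward scan that stops after n
-- non-system messages (objective: alternative); for n ≤ 0 B returns [] where A's [-n:]
-- slice accidentally keeps messages — stated as the intended difference D_ below.

-- ===== PORT A =====
-- _truncate(s): s if len(s) <= 300 else s[:300] + "..."  (str(s) is the identity on str)
def pvTruncA (s : String) : String :=
  if PySem.Str.len s ≤ 300 then s
  else PySem.Str.slice s none (some 300) ++ "..."

-- one result row: {"role": m.get("role", "?"), "content": _truncate(str(m.get("content","") or ""))}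
-- ('x or ""' on a str x is x itself when nonempty, "" when empty; str() on a str is the identity)
def pvRowA (m : List (String × String)) : List (String × String) :=
  let role := (m.lookup "role").getD "?"
  let content0 := (m.lookup "content").getD ""
  let content := if content0 == "" then "" else content0
  [("role", role), ("content", pvTruncA content)]

def messages_summary_py (messages : List (List (String × String))) (n : Int) : List (List (String × String)) :=
  let nonSystem := messages.filter (fun m => !((m.lookup "role") == some "system"))
  -- non_system[-n:]  (m.get("role") != "system": a missing key compares unequal, so it is kept)
  let window := PySem.List.slice nonSystem (some (-n)) none
  window.foldl (fun result m => result ++ [pvRowA m]) []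

-- ===== PORT B =====
def pvTruncB (s : String) : String :=
  if PySem.Str.len s > 300 then PySem.Str.slice s none (some 300) ++ "..."
  else s

def pvRowB (m : List (String × String)) : List (String × String) :=
  let content0 := (m.lookup "content").getD ""
  [("role", (m.lookup "role").getD "?"),
   ("content", pvTruncB (if content0 == "" then "" else content0))]

-- the backward scan: 'for m in reversed(messages): if len(buf) >= n: break; if non-system: buf.append(m)'
def pvCollectB (xs : List (List (String × String))) (n : Int) (buf : List (List (String × String))) : List (List (String × String)) :=
  match xs with
  | [] => buf
  | m :: t =>
    if (buf.length : Int) ≥ n then buf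
    else if (m.lookup "role") == some "system" then pvCollectB t n buf
    else pvCollectB t n (buf ++ [m])

def messages_summary_py_alt (messages : List (List (String × String))) (n : Int) : List (List (String × String)) :=
  let buf := pvCollectB messages.reverse n []
  buf.reverse.map pvRowB

-- ===== PRECONDITION & SPEC =====
-- Pre_ excludes n ≤ 0, where the meaning of 'last n messages' is unspecified and A's value
-- falls out of Python's negative/zero slice arithmetic in non_system[-n:] (the whole filtered
-- list for n = 0, all but the first -n entries for n < 0) while B returns the empty list.
def Pre_messages_summary_py (messages : List (List (String × String))) (n : Int) : Prop := 1 ≤ n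
instance (messages : List (List (String × String))) (n : Int) : Decidable (Pre_messages_summary_py messages n) := by unfold Pre_messages_summary_py; infer_instance

def pvWitness_messages_summary_py : (List (List (String × String))) × Int := ([[("role", "user"), ("content", "hi")], [("role", "system")]], 2)

def Spec_messages_summary_py (messages : List (List (String × String))) (n : Int) (out : List (List (String × String))) : Prop := out = messages_summary_py_alt messages n
instance (messages : List (List (String × String))) (n : Int) (out : List (List (String × String))) : Decidable (Spec_messages_summary_py messages n out) := by unfold Spec_messages_summary_py; infer_instance

-- ===== CLAIM =====
def Claim_equal_messages_summary_py : Prop := ∀ (messages : List (List (String × String))) (n : Int), Dom_messages_summary_py messages n → Pre_messages_summary_py messages n → Spec_messages_summary_py messages n (messages_summary_py messages n)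

-- ===== LEMMAS AND PROOFS =====

theorem pvTrunc_eq (s : String) : pvTruncB s = pvTruncA s := by
  unfold pvTruncA pvTruncB
  split_ifs <;> first | rfl | omega

theorem pvRow_eq (m : List (String × String)) : pvRowB m = pvRowA m := by
  simp [pvRowA, pvRowB, pvTrunc_eq]

-- the backward scan collects (take of the filtered reversed list), as long as it has room
theorem pvCollectB_eq (n : Int) :
    ∀ (xs buf : List (List (String × String))), (buf.length : Int) ≤ n →
    pvCollectB xs n buf
      = buf ++ (xs.filter (fun m => !((m.lookup "role") == some "system"))).take (n.toNat - buf.length) := by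
  intro xs
  induction xs with
  | nil => simp [pvCollectB]
  | cons m t ih =>
    intro buf hle
    unfold pvCollectB
    by_cases hfull : (buf.length : Int) ≥ n
    · have h0 : n.toNat - buf.length = 0 := by omega
      rw [if_pos hfull, h0]
      simp
    · rw [if_neg hfull]
      by_cases hm : (List.lookup "role" m == some "system") = true
      · have hp : (!(List.lookup "role" m == some "system")) = false := by simp [hm]
        rw [if_pos hm, List.filter_cons, hp, if_neg (by simp)]
        exact ih buf hle
      · have hp : (!(List.lookup "role" m == some "system")) = true := by simp [hm]
        rw [if_neg hm, List.filter_cons, hp, if_pos rfl]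
        rw [ih (buf ++ [m]) (by simp; omega)]
        have hk : n.toNat - buf.length = (n.toNat - (buf ++ [m]).length) + 1 := by
          simp; omega
        rw [hk, List.take_succ_cons]
        simp

-- B = reverse (take n.toNat of the reversed filtered list), mapped
theorem pvAlt_eq (messages : List (List (String × String))) (n : Int) (hn : 0 ≤ n) :
    messages_summary_py_alt messages n
      = (((messages.filter (fun m => !((m.lookup "role") == some "system"))).reverse.take n.toNat).reverse).map pvRowB := by
  unfold messages_summary_py_alt
  rw [pvCollectB_eq n messages.reverse [] (by simpa using hn)]
  simp [List.filter_reverse]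

theorem pvA_eq (messages : List (List (String × String))) (n : Int) :
    messages_summary_py messages n
      = (PySem.List.slice (messages.filter (fun m => !((m.lookup "role") == some "system"))) (some (-n)) none).map pvRowA := by
  unfold messages_summary_py
  rw [PySem.List.foldl_append_singleton_eq_map]
  simp

-- reverse-take-reverse is drop
theorem pv_rev_take (l : List (List (String × String))) (k : Nat) :
    (l.reverse.take k).reverse = l.drop (l.length - k) := by
  induction l with
  | nil => simp
  | cons a t ih =>
    by_cases hk : k ≤ t.length
    · have : (a :: t).reverse.take k = t.reverse.take k := by
        rw [List.reverse_cons, List.take_append_of_le_length (by simpa using hk)]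
      rw [this, ih]
      have h1 : (a :: t).length - k = (t.length - k) + 1 := by simp; omega
      rw [h1, List.drop_succ_cons]
    · have h2 : (a :: t).reverse.take k = (a :: t).reverse := by
        apply List.take_of_length_le; simp; omega
      rw [h2, List.reverse_reverse]
      have : (a :: t).length - k = 0 := by simp; omega
      rw [this, List.drop_zero]

theorem pvEqual (messages : List (List (String × String))) (n : Int)
    (hn : 1 ≤ n) :
    messages_summary_py messages n = messages_summary_py_alt messages n := by
  set l := messages.filter (fun m => !((m.lookup "role") == some "system")) with hl
  rw [pvA_eq, PySem.List.slice_some_none, pvAlt_eq messages n (by omega), pv_rev_take, ← hl]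
  have hclamp : PySem.List.clampIdx l.length (-n) = l.length - n.toNat := by
    have h1 : -n = -((n.toNat : Nat) : Int) := by omega
    rw [h1, PySem.List.clampIdx_neg_natCast _ _ (by omega)]
  rw [hclamp]
  exact List.map_congr_left (fun m _ => (pvRow_eq m).symm)

-- ===== VERDICT =====
theorem messages_summary_py_spec : Claim_equal_messages_summary_py := by
  intro messages n _ hn
  exact pvEqual messages n hn
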